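-- pv_equiv track=rewrite | github.com/oouyang/xsw | scripts/analyze_puzzles.py | is_holes
-- ===== SOURCE A (Python) =====
-- def get_4neighbors(cell):
--     """Return 4-adjacent neighbors of cell on 8x8 board."""
--     r, c = divmod(cell, 8)
--     neighbors = []
--     if r > 0:
--         neighbors.append((r - 1) * 8 + c)
--     if r < 7:
--         neighbors.append((r + 1) * 8 + c)
--     if c > 0:
--         neighbors.append(r * 8 + c - 1)
--     if c < 7:
--         neighbors.append(r * 8 + c + 1)
--     return neighbors
--
-- def is_holes(grey_cells):
--     """Check that the 3 grey pieces are mutually non-adjacent.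
--     grey_cells = [g1, g2a, g2b, g3a, g3b, g3c]"""
--     piece1 = {grey_cells[0]}
--     piece2 = {grey_cells[1], grey_cells[2]}
--     piece3 = {grey_cells[3], grey_cells[4], grey_cells[5]}
--
--     def pieces_adjacent(a, b):
--         for cell_a in a:
--             nb = set(get_4neighbors(cell_a))
--             if nb & b:
--                 return True
--         return False
--
--     if pieces_adjacent(piece1, piece2):
--         return False
--     if pieces_adjacent(piece1, piece3):
--         return False
--     if pieces_adjacent(piece2, piece3):
--         return False
--     return True
-- ===== SOURCE B (Python) =====
-- def is_holes(grey_cells):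
--     """Check that the 3 grey pieces are mutually non-adjacent.
--     grey_cells = [g1, g2a, g2b, g3a, g3b, g3c]"""
--     pieces = [[grey_cells[0]],
--               [grey_cells[1], grey_cells[2]],
--               [grey_cells[3], grey_cells[4], grey_cells[5]]]
--     halo = set()  # all cells 4-adjacent to some cell of an earlier piece
--     for piece in pieces:
--         if any(cell in halo for cell in piece):
--             return False
--         for cell in piece:
--             r, c = divmod(cell, 8)
--             if r > 0:
--                 halo.add(cell - 8)
--             if r < 7:
--                 halo.add(cell + 8)
--             if c > 0:
--                 halo.add(cell - 1)
--             if c < 7: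
--                 halo.add(cell + 1)
--     return True
-- ===== Notes on version B (the rewrite author's own statement) =====
-- stated objective: alternative
-- what changed: B replaces A's three pairwise piece comparisons (per-cell neighbor-set construction + set intersection per pair) by a single sweep over the pieces in order, maintaining one accumulated 'halo' set of all cells adjacent to earlier pieces and rejecting as soon as a piece touches it.
import Mathlib
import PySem

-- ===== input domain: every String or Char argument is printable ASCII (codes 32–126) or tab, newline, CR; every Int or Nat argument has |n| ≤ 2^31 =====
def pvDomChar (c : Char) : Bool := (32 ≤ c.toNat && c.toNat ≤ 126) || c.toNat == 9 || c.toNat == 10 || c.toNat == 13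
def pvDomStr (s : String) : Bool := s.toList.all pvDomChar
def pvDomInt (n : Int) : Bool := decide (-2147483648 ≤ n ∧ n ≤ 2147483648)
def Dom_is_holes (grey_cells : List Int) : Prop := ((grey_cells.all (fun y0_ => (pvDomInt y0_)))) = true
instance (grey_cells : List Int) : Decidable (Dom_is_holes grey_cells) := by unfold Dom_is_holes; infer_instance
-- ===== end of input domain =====

-- B replaces A's three pairwise piece comparisons (per-cell neighbor sets + set
-- intersection) by one sweep over the pieces accumulating a single halo set of
-- cells adjacent to earlier pieces (objective: alternative).

-- ===== PORT A =====
def get_4neighbors (cell : Int) : List Int :=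
  let r := PySem.Int.floordiv cell 8
  let c := PySem.Int.mod cell 8
  ((((([] : List Int)
    ++ (if r > 0 then [(r - 1) * 8 + c] else []))
    ++ (if r < 7 then [(r + 1) * 8 + c] else []))
    ++ (if c > 0 then [r * 8 + c - 1] else []))
    ++ (if c < 7 then [r * 8 + c + 1] else []))

def pieces_adjacent (a b : PySem.Set Int) : Bool :=
  a.any (fun cell_a =>
    let nb : PySem.Set Int := PySem.Set.ofList (get_4neighbors cell_a)
    !(PySem.Set.inter nb b).isEmpty)

def is_holes (grey_cells : List Int) : Bool :=
  match PySem.List.pyGet? grey_cells 0, PySem.List.pyGet? grey_cells 1,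
        PySem.List.pyGet? grey_cells 2, PySem.List.pyGet? grey_cells 3,
        PySem.List.pyGet? grey_cells 4, PySem.List.pyGet? grey_cells 5 with
  | some g0, some g1, some g2, some g3, some g4, some g5 =>
    let piece1 : PySem.Set Int := PySem.Set.ofList [g0]
    let piece2 : PySem.Set Int := PySem.Set.ofList [g1, g2]
    let piece3 : PySem.Set Int := PySem.Set.ofList [g3, g4, g5]
    if pieces_adjacent piece1 piece2 then false
    else if pieces_adjacent piece1 piece3 then false
    else if pieces_adjacent piece2 piece3 then false
    else true
  | _, _, _, _, _, _ => false   -- IndexError: outside Pre_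

-- ===== PORT B =====
-- halo insertion of one cell's four board neighbors (Source B's inner loop body)
def add_halo (halo : PySem.Set Int) (cell : Int) : PySem.Set Int :=
  let r := PySem.Int.floordiv cell 8
  let c := PySem.Int.mod cell 8
  let h1 := if r > 0 then PySem.Set.add halo (cell - 8) else halo
  let h2 := if r < 7 then PySem.Set.add h1 (cell + 8) else h1
  let h3 := if c > 0 then PySem.Set.add h2 (cell - 1) else h2
  if c < 7 then PySem.Set.add h3 (cell + 1) else h3

-- Source B's 'for piece in pieces' loop with early return
def sweep : List (List Int) → PySem.Set Int → Bool
  | [], _ => true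
  | piece :: rest, halo =>
    if piece.any (fun cell => PySem.Set.contains halo cell) then false
    else sweep rest (piece.foldl add_halo halo)

def is_holes_alt (grey_cells : List Int) : Bool :=
  (((PySem.List.pyGet? grey_cells 0).bind fun g0 =>
    (PySem.List.pyGet? grey_cells 1).bind fun g1 =>
    (PySem.List.pyGet? grey_cells 2).bind fun g2 =>
    (PySem.List.pyGet? grey_cells 3).bind fun g3 =>
    (PySem.List.pyGet? grey_cells 4).bind fun g4 =>
    (PySem.List.pyGet? grey_cells 5).map fun g5 =>
      sweep [[g0], [g1, g2], [g3, g4, g5]] PySem.Set.empty).getD false)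
  -- none = IndexError: outside Pre_

-- ===== PRECONDITION & SPEC =====
-- Pre_ excludes exactly the lists of length < 6, on which A raises IndexError.
def Pre_is_holes (grey_cells : List Int) : Prop := 6 ≤ grey_cells.length
instance (grey_cells : List Int) : Decidable (Pre_is_holes grey_cells) := by unfold Pre_is_holes; infer_instance
def pvWitness_is_holes : List Int := [0, 2, 3, 32, 40, 41]

def Spec_is_holes (grey_cells : List Int) (out : Bool) : Prop := out = is_holes_alt grey_cells
instance (grey_cells : List Int) (out : Bool) : Decidable (Spec_is_holes grey_cells out) := by unfold Spec_is_holes; infer_instance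

-- ===== CLAIM (what is proved, stated in full; the proofs are below) =====
def Claim_equal_is_holes : Prop := ∀ (grey_cells : List Int), Dom_is_holes grey_cells → Pre_is_holes grey_cells → Spec_is_holes grey_cells (is_holes grey_cells)

-- ===== LEMMAS AND PROOFS =====

-- membership in B's halo after inserting one cell = membership in A's neighbor list
theorem mem_add_halo (halo : PySem.Set Int) (cell x : Int) :
    x ∈ add_halo halo cell ↔ x ∈ halo ∨ x ∈ get_4neighbors cell := by
  have hid : PySem.Int.floordiv cell 8 * 8 + PySem.Int.mod cell 8 = cell :=
    PySem.Int.floordiv_mul_add_mod cell 8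
  have e1 : (PySem.Int.floordiv cell 8 - 1) * 8 + PySem.Int.mod cell 8 = cell - 8 := by omega
  have e2 : (PySem.Int.floordiv cell 8 + 1) * 8 + PySem.Int.mod cell 8 = cell + 8 := by omega
  have e3 : PySem.Int.floordiv cell 8 * 8 + PySem.Int.mod cell 8 - 1 = cell - 1 := by omega
  have e4 : PySem.Int.floordiv cell 8 * 8 + PySem.Int.mod cell 8 + 1 = cell + 1 := by omega
  simp only [add_halo, get_4neighbors, List.mem_append, e1, e2, e3, e4]
  split_ifs <;>
    simp only [PySem.Set.mem_add, List.mem_singleton, List.not_mem_nil, or_false,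
      false_or] <;> tauto

-- membership in the halo accumulated over a whole piece
theorem mem_foldl_add_halo (piece : List Int) (halo : PySem.Set Int) (x : Int) :
    x ∈ piece.foldl add_halo halo ↔ x ∈ halo ∨ ∃ a ∈ piece, x ∈ get_4neighbors a := by
  induction piece generalizing halo with
  | nil => simp
  | cons a as ih =>
    simp only [List.foldl_cons, ih, mem_add_halo, List.mem_cons]
    constructor
    · rintro ((h | h) | ⟨b, hb, hx⟩)
      · exact Or.inl h
      · exact Or.inr ⟨a, Or.inl rfl, h⟩
      · exact Or.inr ⟨b, Or.inr hb, hx⟩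
    · rintro (h | ⟨b, (rfl | hb), hx⟩)
      · exact Or.inl (Or.inl h)
      · exact Or.inl (Or.inr hx)
      · exact Or.inr ⟨b, hb, hx⟩

-- A's set-based piece adjacency as a proposition
theorem pieces_adjacent_iff (xs ys : List Int) :
    pieces_adjacent (PySem.Set.ofList xs) (PySem.Set.ofList ys) = true
      ↔ ∃ b ∈ ys, ∃ a ∈ xs, b ∈ get_4neighbors a := by
  simp only [pieces_adjacent, List.any_eq_true, Bool.not_eq_true',
    List.isEmpty_eq_false_iff_exists_mem, PySem.Set.mem_inter, PySem.Set.mem_ofList]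
  tauto

-- pyGet? on a 6+-element list at the literal indices
theorem pyGet6 (g0 g1 g2 g3 g4 g5 : Int) (rest : List Int) :
    PySem.List.pyGet? (g0 :: g1 :: g2 :: g3 :: g4 :: g5 :: rest) 0 = some g0 ∧
    PySem.List.pyGet? (g0 :: g1 :: g2 :: g3 :: g4 :: g5 :: rest) 1 = some g1 ∧
    PySem.List.pyGet? (g0 :: g1 :: g2 :: g3 :: g4 :: g5 :: rest) 2 = some g2 ∧
    PySem.List.pyGet? (g0 :: g1 :: g2 :: g3 :: g4 :: g5 :: rest) 3 = some g3 ∧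
    PySem.List.pyGet? (g0 :: g1 :: g2 :: g3 :: g4 :: g5 :: rest) 4 = some g4 ∧
    PySem.List.pyGet? (g0 :: g1 :: g2 :: g3 :: g4 :: g5 :: rest) 5 = some g5 := by
  refine ⟨?_, ?_, ?_, ?_, ?_, ?_⟩ <;>
    (rw [PySem.List.pyGet?_of_nonneg _ (by norm_num)]; simp)

-- ===== VERDICT (by name: the statement is the Claim_ definition above) =====
theorem is_holes_spec : Claim_equal_is_holes := by
  intro g _ hpre
  unfold Spec_is_holes
  obtain ⟨g0, g1, g2, g3, g4, g5, rest, rfl⟩ :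
      ∃ g0 g1 g2 g3 g4 g5 rest, g = g0 :: g1 :: g2 :: g3 :: g4 :: g5 :: rest := by
    match g, hpre with
    | g0 :: g1 :: g2 :: g3 :: g4 :: g5 :: rest, _ =>
      exact ⟨g0, g1, g2, g3, g4, g5, rest, rfl⟩
  obtain ⟨p0, p1, p2, p3, p4, p5⟩ := pyGet6 g0 g1 g2 g3 g4 g5 rest
  rw [is_holes, is_holes_alt]
  simp only [p0, p1, p2, p3, p4, p5, Option.bind_some, Option.map_some, Option.getD_some]
  -- unfold B's sweep over the three concrete pieces
  simp only [sweep, List.any_cons, List.any_nil, List.foldl_cons, List.foldl_nil,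
    Bool.or_false]
  have hmem2 : ∀ x : Int, x ∈ add_halo PySem.Set.empty g0 ↔ x ∈ get_4neighbors g0 := by
    intro x
    have := mem_foldl_add_halo [g0] PySem.Set.empty x
    simpa [PySem.Set.empty] using this
  have hmem3 : ∀ x : Int,
      x ∈ add_halo (add_halo (add_halo PySem.Set.empty g0) g1) g2
        ↔ ∃ a ∈ [g0, g1, g2], x ∈ get_4neighbors a := by
    intro x
    have := mem_foldl_add_halo [g0, g1, g2] PySem.Set.empty x
    simpa [PySem.Set.empty] using this
  rw [Bool.eq_iff_iff]
  split_ifs <;> simp_all [pieces_adjacent_iff, PySem.Set.empty]
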